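-- pv_equiv track=rewrite | github.com/bayuewalker/walkermind-os | projects/polymarket/crusaderbot/bot/handlers/admin.py | _parse_limit
-- ===== SOURCE A (Python) =====
-- MAX_OPS_LIMIT = 50
--
-- def _parse_limit(args: list[str], default: int) -> tuple[int, bool]:
--     only_failed = False
--     limit = default
--     for tok in args:
--         t = tok.strip().lower()
--         if t == "failed":
--             only_failed = True
--             continue
--         try:
--             limit = max(1, min(MAX_OPS_LIMIT, int(t)))
--         except ValueError:
--             continue
--     return limit, only_failed
-- ===== SOURCE B (Python) =====
-- MAX_OPS_LIMIT = 50
--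
-- def _parse_limit(args: list[str], default: int) -> tuple[int, bool]:
--     only_failed = any(tok.strip().lower() == "failed" for tok in args)
--     limit = default
--     for tok in reversed(args):
--         try:
--             v = int(tok.strip().lower())
--         except ValueError:
--             continue
--         limit = max(1, min(MAX_OPS_LIMIT, v))
--         break
--     return limit, only_failed
-- ===== Notes on version B (the rewrite author's own statement) =====
-- stated objective: simpler
-- what changed: Replaces the single fused accumulator loop by two independent passes: only_failed via any(), and the limit by scanning reversed(args) and stopping at the first parseable integer (the original's last), so no overwriting state is carried.
import Mathlib
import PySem

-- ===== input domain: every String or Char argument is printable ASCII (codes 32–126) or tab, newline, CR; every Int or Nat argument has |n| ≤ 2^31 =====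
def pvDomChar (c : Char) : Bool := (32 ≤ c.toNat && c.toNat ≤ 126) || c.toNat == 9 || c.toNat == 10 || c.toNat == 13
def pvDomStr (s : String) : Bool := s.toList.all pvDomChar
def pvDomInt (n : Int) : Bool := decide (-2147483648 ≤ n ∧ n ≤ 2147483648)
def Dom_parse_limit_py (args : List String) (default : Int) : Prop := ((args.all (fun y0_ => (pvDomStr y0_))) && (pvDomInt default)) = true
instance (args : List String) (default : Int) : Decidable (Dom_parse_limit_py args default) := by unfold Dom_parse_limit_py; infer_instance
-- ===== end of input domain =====

-- B splits A's single fused accumulator loop into two independent passes: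
-- only_failed via any(), and the limit by a reversed scan stopping at the first parseable int.


-- ===== PORT A =====
-- literal port of A's loop body: state (limit, only_failed), one token
def pvStepA (acc : Int × Bool) (tok : String) : Int × Bool :=
  let t := PySem.Str.lower (PySem.Str.strip tok)
  if t = "failed" then (acc.1, true)
  else
    match PySem.Int.ofStr? t with
    | some v => (max 1 (min 50 v), acc.2)
    | none => acc

def parse_limit_py (args : List String) (default : Int) : Int × Bool :=
  args.foldl pvStepA (default, false)

-- ===== PORT B =====
-- reversed scan: first parseable token wins, clamped; default if none
def pvLimitRev (ts : List String) (default : Int) : Int :=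
  match ts with
  | [] => default
  | tok :: rest =>
    match PySem.Int.ofStr? (PySem.Str.lower (PySem.Str.strip tok)) with
    | some v => max 1 (min 50 v)
    | none => pvLimitRev rest default

def parse_limit_py_alt (args : List String) (default : Int) : Int × Bool :=
  let only_failed := args.any (fun tok => PySem.Str.lower (PySem.Str.strip tok) == "failed")
  let limit := pvLimitRev args.reverse default
  (limit, only_failed)

-- ===== PRECONDITION & SPEC =====
def Spec_parse_limit_py (args : List String) (default : Int) (out : Int × Bool) : Prop := out = parse_limit_py_alt args default
instance (args : List String) (default : Int) (out : Int × Bool) : Decidable (Spec_parse_limit_py args default out) := by unfold Spec_parse_limit_py; infer_instance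

-- ===== CLAIM (what is proved, stated in full; the proofs are below) =====
def Claim_equal_parse_limit_py : Prop := ∀ (args : List String) (default : Int), Dom_parse_limit_py args default → Spec_parse_limit_py args default (parse_limit_py args default)

-- ===== LEMMAS AND PROOFS =====

-- the step A's loop applies to the limit component
def pvStep (l : Int) (tok : String) : Int :=
  match PySem.Int.ofStr? (PySem.Str.lower (PySem.Str.strip tok)) with
  | some v => max 1 (min 50 v)
  | none => l

-- "failed" is not an int, so A's 'failed' branch leaves the limit unchanged too
lemma ofStr?_failed : PySem.Int.ofStr? "failed" = none := by decide

-- appending a token at the end of the reversed scan makes it the fallback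
lemma pvLimitRev_append (ts : List String) (tok : String) (l : Int) :
    pvLimitRev (ts ++ [tok]) l = pvLimitRev ts (pvStep l tok) := by
  induction ts with
  | nil => simp [pvLimitRev, pvStep]
  | cons x xs ih =>
    simp only [List.cons_append, pvLimitRev]
    cases PySem.Int.ofStr? (PySem.Str.lower (PySem.Str.strip x)) with
    | some v => rfl
    | none => exact ih

lemma foldA_eq (args : List String) :
    ∀ (l : Int) (b : Bool),
    args.foldl pvStepA (l, b)
      = (pvLimitRev args.reverse l,
         b || args.any (fun tok => PySem.Str.lower (PySem.Str.strip tok) == "failed")) := by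
  induction args with
  | nil => intro l b; simp [pvLimitRev]
  | cons tok rest ih =>
    intro l b
    simp only [List.foldl_cons, List.any_cons, List.reverse_cons]
    by_cases h : PySem.Str.lower (PySem.Str.strip tok) = "failed"
    · have hb : (PySem.Str.lower (PySem.Str.strip tok) == "failed") = true := beq_iff_eq.mpr h
      have hs : pvStep l tok = l := by unfold pvStep; rw [h, ofStr?_failed]
      have ha : pvStepA (l, b) tok = (l, true) := by unfold pvStepA; rw [if_pos h]
      rw [ha, ih l true, pvLimitRev_append, hs, hb]
      simp only [Bool.true_or, Bool.or_true]
    · have hb : (PySem.Str.lower (PySem.Str.strip tok) == "failed") = false :=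
        beq_eq_false_iff_ne.mpr h
      cases hv : PySem.Int.ofStr? (PySem.Str.lower (PySem.Str.strip tok)) with
      | some v =>
        have ha : pvStepA (l, b) tok = (max 1 (min 50 v), b) := by
          unfold pvStepA; rw [if_neg h, hv]
        have hs : pvStep l tok = max 1 (min 50 v) := by unfold pvStep; rw [hv]
        rw [ha, ih (max 1 (min 50 v)) b, pvLimitRev_append, hs, hb]
        simp only [Bool.false_or]
      | none =>
        have ha : pvStepA (l, b) tok = (l, b) := by unfold pvStepA; rw [if_neg h, hv]
        have hs : pvStep l tok = l := by unfold pvStep; rw [hv]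
        rw [ha, ih l b, pvLimitRev_append, hs, hb]
        simp only [Bool.false_or]

-- ===== VERDICT (by name: the statement is the Claim_ definition above) =====
theorem parse_limit_py_spec : Claim_equal_parse_limit_py := by
  intro args default _
  unfold Spec_parse_limit_py parse_limit_py parse_limit_py_alt
  simpa using foldA_eq args default false
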